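-- pv_equiv track=rewrite | github.com/zephchang/marx_vector | src/data_processing/s1_prep.py | prep_strip
-- ===== SOURCE A (Python) =====
-- def prep_strip (content):
--     split_text = [line.strip() for line in content.split("\n") if line.strip()]
--
--     combined_text = []
--     i = 0
--     while i < len(split_text):
--         current_line = split_text[i]
--         while len(current_line.split()) < 20 and i + 1 < len(split_text):
--             i += 1
--             current_line += " " + split_text[i]
--         combined_text.append(current_line)
--         i += 1
--
--     return combined_text
-- ===== SOURCE B (Python) =====
-- def prep_strip(content):
--     lines = [line.strip() for line in content.split("\n") if line.strip()]
--
--     chunks = []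
--     buf = ""
--     count = 0
--     for line in lines:
--         buf = line if not buf else buf + " " + line
--         count += len(line.split())
--         if count >= 20:
--             chunks.append(buf)
--             buf = ""
--             count = 0
--     if buf:
--         chunks.append(buf)
--     return chunks
-- ===== Notes on version B (the rewrite author's own statement) =====
-- stated objective: simpler
-- what changed: Replaced the index-based outer/inner while loops that repeatedly re-split the growing accumulated string with a single forward pass keeping a buffer and a running word count.
import Mathlib
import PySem

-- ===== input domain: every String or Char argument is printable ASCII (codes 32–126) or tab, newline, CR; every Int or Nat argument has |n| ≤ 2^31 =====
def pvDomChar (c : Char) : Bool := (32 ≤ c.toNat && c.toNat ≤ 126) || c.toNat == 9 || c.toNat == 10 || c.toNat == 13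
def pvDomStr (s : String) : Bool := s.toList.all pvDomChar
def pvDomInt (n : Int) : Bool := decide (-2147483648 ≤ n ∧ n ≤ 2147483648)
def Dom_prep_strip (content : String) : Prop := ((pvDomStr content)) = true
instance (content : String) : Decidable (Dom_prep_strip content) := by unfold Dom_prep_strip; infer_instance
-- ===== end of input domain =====

-- B replaces A's index-based nested while loops (which re-split the whole growing chunk after
-- every appended line) by a single pass keeping a buffer and a running word count; same return value.

-- ===== PORT A =====
-- inner while loop: append " " + next line while the chunk has < 20 words and lines remain
def prepInnerA (cur : List Char) (rest : List (List Char)) : List Char × List (List Char) :=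
  if (PySem.Chars.split₀ cur).length < 20 then
    match rest with
    | [] => (cur, [])
    | r :: rs => prepInnerA (cur ++ ' ' :: r) rs
  else (cur, rest)
termination_by rest.length

theorem prepInnerA_snd_le (cur : List Char) (rest : List (List Char)) :
    (prepInnerA cur rest).2.length ≤ rest.length := by
  induction rest generalizing cur with
  | nil => rw [prepInnerA.eq_def]; split <;> simp
  | cons r rs ih =>
      rw [prepInnerA.eq_def]
      split
      · exact le_trans (ih _) (Nat.le_succ _)
      · simp

def prepOuterA (ls : List (List Char)) : List (List Char) :=
  match ls with
  | [] => []
  | l :: rest =>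
      (prepInnerA l rest).1 :: prepOuterA (prepInnerA l rest).2
termination_by ls.length
decreasing_by
  exact Nat.lt_succ_of_le (prepInnerA_snd_le l rest)

def prep_strip (content : String) : List String :=
  let split_text :=
    ((PySem.Chars.splitOn content.toList ['\n']).map PySem.Chars.strip).filter (fun l => !l.isEmpty)
  (prepOuterA split_text).map String.ofList

-- ===== PORT B =====
-- one step of B's single pass: state = (chunks, buffer, running word count)
def prepStepB (st : List (List Char) × List Char × Nat) (line : List Char) :
    List (List Char) × List Char × Nat :=
  let buf := if st.2.1.isEmpty then line else st.2.1 ++ ' ' :: line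
  let cnt := st.2.2 + (PySem.Chars.split₀ line).length
  if 20 ≤ cnt then (st.1 ++ [buf], [], 0) else (st.1, buf, cnt)

def prepFinishB (st : List (List Char) × List Char × Nat) : List (List Char) :=
  if st.2.1.isEmpty then st.1 else st.1 ++ [st.2.1]

def prep_strip_alt (content : String) : List String :=
  let lines :=
    ((PySem.Chars.splitOn content.toList ['\n']).map PySem.Chars.strip).filter (fun l => !l.isEmpty)
  (prepFinishB (lines.foldl prepStepB ([], [], 0))).map String.ofList

-- ===== PRECONDITION & SPEC =====
def Spec_prep_strip (content : String) (out : List String) : Prop := out = prep_strip_alt content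
instance (content : String) (out : List String) : Decidable (Spec_prep_strip content out) := by unfold Spec_prep_strip; infer_instance

-- ===== CLAIM (what is proved, stated in full; the proofs are below) =====
def Claim_equal_prep_strip : Prop := ∀ (content : String), Dom_prep_strip content → Spec_prep_strip content (prep_strip content)

-- ===== LEMMAS AND PROOFS =====
theorem split0_go_nil (cur : List Char) (acc : List (List Char)) :
    PySem.Chars.split₀.go [] cur acc =
      if cur.isEmpty then acc.reverse else (cur.reverse :: acc).reverse := rfl

theorem split0_go_cons (c : Char) (rest cur : List Char) (acc : List (List Char)) :
    PySem.Chars.split₀.go (c :: rest) cur acc =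
      if PySem.Chars.isspace c then
        (if cur.isEmpty then PySem.Chars.split₀.go rest [] acc
         else PySem.Chars.split₀.go rest [] (cur.reverse :: acc))
      else PySem.Chars.split₀.go rest (c :: cur) acc := rfl

theorem split0_go_acc (s : List Char) (cur : List Char) (acc : List (List Char)) :
    PySem.Chars.split₀.go s cur acc = acc.reverse ++ PySem.Chars.split₀.go s cur [] := by
  induction s generalizing cur acc with
  | nil =>
      rw [split0_go_nil, split0_go_nil]
      by_cases h : cur.isEmpty <;> simp [h]
  | cons c rest ih =>
      rw [split0_go_cons, split0_go_cons]
      by_cases hs : PySem.Chars.isspace c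
      · by_cases h : cur.isEmpty
        · simp only [hs, h, if_true]
          exact ih [] acc
        · simp only [hs, h, if_true, Bool.false_eq_true, if_false]
          rw [ih [] (cur.reverse :: acc), ih [] [cur.reverse]]
          simp
      · simp only [hs, Bool.false_eq_true, if_false]
        exact ih (c :: cur) acc

theorem split0_go_append (xs ys : List Char) (cur : List Char) (acc : List (List Char)) :
    PySem.Chars.split₀.go (xs ++ ' ' :: ys) cur acc =
      PySem.Chars.split₀.go xs cur acc ++ PySem.Chars.split₀.go ys [] [] := by
  induction xs generalizing cur acc with
  | nil =>
      have hsp : PySem.Chars.isspace ' ' = true := by decide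
      rw [List.nil_append, split0_go_cons, split0_go_nil]
      by_cases h : cur.isEmpty
      · rw [if_pos hsp, if_pos h, if_pos h, split0_go_acc ys [] acc]
      · rw [if_pos hsp, if_neg (by simp [h]), if_neg (by simp [h]),
          split0_go_acc ys [] (cur.reverse :: acc)]
  | cons c rest ih =>
      rw [List.cons_append, split0_go_cons, split0_go_cons]
      by_cases hs : PySem.Chars.isspace c
      · by_cases h : cur.isEmpty
        · rw [if_pos hs, if_pos hs, if_pos h, if_pos h, ih]
        · rw [if_pos hs, if_pos hs, if_neg (by simp [h]), if_neg (by simp [h]), ih]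
      · rw [if_neg (by simp [hs]), if_neg (by simp [hs]), ih]

theorem split0_append_space (a b : List Char) :
    PySem.Chars.split₀ (a ++ ' ' :: b) = PySem.Chars.split₀ a ++ PySem.Chars.split₀ b := by
  simp only [PySem.Chars.split₀]
  rw [split0_go_append, split0_go_acc b [] []]

theorem chunk_loops_agree (ls : List (List Char)) (hne : ∀ l ∈ ls, l ≠ []) :
    (∀ (res : List (List Char)) (cur : List Char), cur ≠ [] →
        (PySem.Chars.split₀ cur).length < 20 →
        prepFinishB (ls.foldl prepStepB (res, cur, (PySem.Chars.split₀ cur).length)) =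
          res ++ (prepInnerA cur ls).1 :: prepOuterA (prepInnerA cur ls).2) ∧
    (∀ (res : List (List Char)),
        prepFinishB (ls.foldl prepStepB (res, [], 0)) = res ++ prepOuterA ls) := by
  induction ls with
  | nil =>
      refine ⟨?_, ?_⟩
      · intro res cur hcur hlt
        rw [prepInnerA.eq_def]
        simp [hlt, prepOuterA, prepFinishB, List.isEmpty_iff, hcur]
      · intro res
        simp [prepOuterA, prepFinishB]
  | cons r rs ih =>
      have hner : r ≠ [] := hne r (by simp)
      have hne' : ∀ l ∈ rs, l ≠ [] := fun l hl => hne l (by simp [hl])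
      have ihM := (ih hne').1
      have ihT := (ih hne').2
      refine ⟨?_, ?_⟩
      · intro res cur hcur hlt
        have hstep : prepStepB (res, cur, (PySem.Chars.split₀ cur).length) r =
            if 20 ≤ (PySem.Chars.split₀ (cur ++ ' ' :: r)).length then
              (res ++ [cur ++ ' ' :: r], [], 0)
            else (res, cur ++ ' ' :: r, (PySem.Chars.split₀ (cur ++ ' ' :: r)).length) := by
          simp [prepStepB, List.isEmpty_iff, hcur, split0_append_space]
        rw [prepInnerA.eq_def]
        simp only [hlt, if_true, List.foldl_cons, hstep]
        by_cases hbig : 20 ≤ (PySem.Chars.split₀ (cur ++ ' ' :: r)).length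
        · rw [if_pos hbig, ihT]
          rw [prepInnerA.eq_def]
          simp [Nat.not_lt.mpr hbig]
        · have hlt' : (PySem.Chars.split₀ (cur ++ ' ' :: r)).length < 20 := Nat.lt_of_not_le hbig
          rw [if_neg hbig]
          exact ihM res (cur ++ ' ' :: r) (by simp [hcur]) hlt'
      · intro res
        have hstep : prepStepB (res, [], 0) r =
            if 20 ≤ (PySem.Chars.split₀ r).length then (res ++ [r], [], 0)
            else (res, r, (PySem.Chars.split₀ r).length) := by
          simp [prepStepB]
        simp only [List.foldl_cons, hstep]
        by_cases hbig : 20 ≤ (PySem.Chars.split₀ r).length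
        · rw [if_pos hbig, ihT]
          have houter : prepOuterA (r :: rs) = r :: prepOuterA rs := by
            rw [prepOuterA, prepInnerA.eq_def]
            simp [Nat.not_lt.mpr hbig]
          rw [houter]; simp
        · rw [if_neg hbig]
          have hlt : (PySem.Chars.split₀ r).length < 20 := Nat.lt_of_not_le hbig
          rw [ihM res r hner hlt, prepOuterA]

-- ===== VERDICT (by name: the statement is the Claim_ definition above) =====
theorem prep_strip_spec : Claim_equal_prep_strip := by
  intro content _
  unfold Spec_prep_strip
  have hne : ∀ l ∈ ((PySem.Chars.splitOn content.toList ['\n']).map PySem.Chars.strip).filter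
      (fun l => !l.isEmpty), l ≠ [] := by
    intro l hl
    have := List.of_mem_filter hl
    simpa [List.isEmpty_iff] using this
  show (prepOuterA (((PySem.Chars.splitOn content.toList ['\n']).map PySem.Chars.strip).filter
      (fun l => !l.isEmpty))).map String.ofList =
    (prepFinishB ((((PySem.Chars.splitOn content.toList ['\n']).map PySem.Chars.strip).filter
      (fun l => !l.isEmpty)).foldl prepStepB ([], [], 0))).map String.ofList
  rw [(chunk_loops_agree _ hne).2 []]
  simp
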